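-- pv_equiv track=rewrite | github.com/Epitech-Tek3/B-AIA-500-STG-5-1-gomoku | ai.py | attackColRight
-- ===== SOURCE A (Python) =====
-- def attackColRight(game, x, y):
--     z = 0
--     t = 0
--     if (y < 0):
--         z = y - y*2
--         y = 0
--     if (y > len(game) - 5):
--         t = y - (len(game) - 5)
--
--     a = 0
--     b = 0
--     count = 0
--     for i in range(y, y + 5 - t - z):
--         if (count == 1 and game[i][x] == 1):
--             a += 1
--             b = a
--         if (count > 1):
--             if (game[i][x] == 1 and a != 0):
--                 a += 1
--                 if (b < a):
--                     b = a
--             else: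
--                 a = 0
--         count += 1
--
--     return b
-- ===== SOURCE B (Python) =====
-- def attackColRight(game, x, y):
--     z = 0
--     t = 0
--     if y < 0:
--         z = -y
--         y = 0
--     if y > len(game) - 5:
--         t = y - (len(game) - 5)
--     run = 0
--     for i in range(y + 1, y + 5 - t - z):
--         if game[i][x] == 1:
--             run += 1
--         else:
--             break
--     return run
-- ===== Notes on version B (the rewrite author's own statement) =====
-- stated objective: simpler
-- what changed: Replaces A's three-branch a/b/count state machine over the whole window by a single counter loop over rows y+1 .. window end that increments while game[i][x] == 1 and breaks at the first non-1.
import Mathlib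
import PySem

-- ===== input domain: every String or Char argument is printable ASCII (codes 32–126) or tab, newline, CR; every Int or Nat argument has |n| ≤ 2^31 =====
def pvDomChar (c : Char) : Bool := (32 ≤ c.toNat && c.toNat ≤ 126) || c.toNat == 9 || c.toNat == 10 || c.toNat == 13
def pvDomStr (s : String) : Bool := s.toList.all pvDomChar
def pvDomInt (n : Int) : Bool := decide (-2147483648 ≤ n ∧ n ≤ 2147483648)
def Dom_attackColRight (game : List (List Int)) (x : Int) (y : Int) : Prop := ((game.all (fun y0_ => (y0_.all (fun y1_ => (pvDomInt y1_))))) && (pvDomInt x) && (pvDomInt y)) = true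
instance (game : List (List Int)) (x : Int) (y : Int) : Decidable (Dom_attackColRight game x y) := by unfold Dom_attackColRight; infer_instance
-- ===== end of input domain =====

-- B replaces A's three-branch a/b/count state machine over the window by a single
-- counter that counts consecutive 1s from row y+1 and stops at the first non-1 (simpler).

-- shared indexing helper: game[i][x] (total via defaults; Pre_ keeps the accessed cells in range)
def pvCell (game : List (List Int)) (x i : Int) : Int :=
  PySem.List.pyGetD (PySem.List.pyGetD game i []) x 0

-- ===== PORT A =====
-- A's loop body, verbatim: state (a, b, count)
def pvStepA (game : List (List Int)) (x : Int) (st : Int × Int × Int) (i : Int) : Int × Int × Int :=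
  let a := st.1; let b := st.2.1; let count := st.2.2
  let (a, b) := if count = 1 ∧ pvCell game x i = 1 then (a + 1, a + 1) else (a, b)
  let (a, b) :=
    if count > 1 then
      if pvCell game x i = 1 ∧ a ≠ 0 then (a + 1, if b < a + 1 then a + 1 else b)
      else (0, b)
    else (a, b)
  (a, b, count + 1)

def attackColRight (game : List (List Int)) (x : Int) (y : Int) : Int :=
  let z : Int := 0
  let t : Int := 0
  let (z, y) := if y < 0 then (y - y * 2, (0 : Int)) else (z, y)
  let t := if y > (game.length : Int) - 5 then y - ((game.length : Int) - 5) else t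
  let st := (PySem.List.pyRange y (y + 5 - t - z) 1).foldl (pvStepA game x) (0, 0, 0)
  st.2.1

-- ===== PORT B =====
-- count consecutive 1s, break at the first non-1
def pvRun (game : List (List Int)) (x : Int) : List Int → Int
  | [] => 0
  | i :: rest => if pvCell game x i = 1 then 1 + pvRun game x rest else 0

def attackColRight_alt (game : List (List Int)) (x : Int) (y : Int) : Int :=
  let (z, y) := if y < 0 then (-y, (0 : Int)) else ((0 : Int), y)
  let t := if y > (game.length : Int) - 5 then y - ((game.length : Int) - 5) else (0 : Int)
  pvRun game x (PySem.List.pyRange (y + 1) (y + 5 - t - z) 1)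

-- ===== PRECONDITION & SPEC =====
-- Pre_ excludes exactly the inputs where A raises IndexError: a column index x out of
-- range for some row A's loop reads (rows y'+1 .. end-1 of the clamped window).
def Pre_attackColRight (game : List (List Int)) (x : Int) (y : Int) : Prop :=
  let y' := if y < 0 then 0 else y
  let z := if y < 0 then -y else 0
  let t := if y' > (game.length : Int) - 5 then y' - ((game.length : Int) - 5) else 0
  ∀ i ∈ PySem.List.pyRange (y' + 1) (y' + 5 - t - z) 1,
    PySem.Raise.InRange (PySem.List.pyGetD game i []).length x
instance (game : List (List Int)) (x : Int) (y : Int) : Decidable (Pre_attackColRight game x y) := by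
  unfold Pre_attackColRight; infer_instance

def pvWitness_attackColRight : List (List Int) × Int × Int := ([[1], [1], [1], [0], [1]], 0, 0)

def Spec_attackColRight (game : List (List Int)) (x : Int) (y : Int) (out : Int) : Prop := out = attackColRight_alt game x y
instance (game : List (List Int)) (x : Int) (y : Int) (out : Int) : Decidable (Spec_attackColRight game x y out) := by unfold Spec_attackColRight; infer_instance

-- ===== CLAIM (what is proved, stated in full; the proofs are below) =====
def Claim_equal_attackColRight : Prop := ∀ (game : List (List Int)) (x : Int) (y : Int), Dom_attackColRight game x y → Pre_attackColRight game x y → Spec_attackColRight game x y (attackColRight game x y)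

-- ===== LEMMAS AND PROOFS =====

-- once a = 0 (the run is broken), b never changes
theorem foldA_broken (game : List (List Int)) (x : Int) :
    ∀ (l : List Int) (k c : Int), 2 ≤ c →
      ((l.foldl (pvStepA game x) (0, k, c)).2.1 : Int) = k := by
  intro l
  induction l with
  | nil => intro k c _; simp
  | cons i rest ih =>
      intro k c hc
      have h1 : ¬ (c = 1) := by omega
      have h2 : c > 1 := by omega
      have hs : pvStepA game x (0, k, c) i = (0, k, c + 1) := by
        simp [pvStepA, h1, h2]
      rw [List.foldl_cons, hs]
      exact ih k (c + 1) (by omega)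

-- mid-run with a = b = k ≥ 1, the final b is k plus the remaining run length
theorem foldA_run (game : List (List Int)) (x : Int) :
    ∀ (l : List Int) (k c : Int), 2 ≤ c → 1 ≤ k →
      ((l.foldl (pvStepA game x) (k, k, c)).2.1 : Int) = k + pvRun game x l := by
  intro l
  induction l with
  | nil => intro k c _ _; simp [pvRun]
  | cons i rest ih =>
      intro k c hc hk
      have h1 : ¬ (c = 1) := by omega
      have h2 : c > 1 := by omega
      by_cases hcell : pvCell game x i = 1
      · have hk0 : k ≠ 0 := by omega
        have hs : pvStepA game x (k, k, c) i = (k + 1, k + 1, c + 1) := by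
          simp [pvStepA, h1, h2, hcell, hk0, lt_add_one k]
        rw [List.foldl_cons, hs, ih (k + 1) (c + 1) (by omega) (by omega), pvRun,
          if_pos hcell]
        ring
      · have hs : pvStepA game x (k, k, c) i = (0, k, c + 1) := by
          simp [pvStepA, h1, h2, hcell]
        rw [List.foldl_cons, hs, foldA_broken game x rest k (c + 1) (by omega), pvRun,
          if_neg hcell]
        ring

-- the whole window, starting at (0,0,0): b = run length from the second cell
theorem foldA_main (game : List (List Int)) (x : Int) (lo hi : Int) :
    ((PySem.List.pyRange lo hi 1).foldl (pvStepA game x) (0, 0, 0)).2.1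
      = pvRun game x (PySem.List.pyRange (lo + 1) hi 1) := by
  by_cases h0 : lo < hi
  · rw [PySem.List.pyRange_one_cons h0]
    have step0 : pvStepA game x (0, 0, 0) lo = (0, 0, 1) := by
      simp [pvStepA]
    rw [List.foldl_cons, step0]
    by_cases h1 : lo + 1 < hi
    · rw [PySem.List.pyRange_one_cons h1]
      by_cases hcell : pvCell game x (lo + 1) = 1
      · have step1 : pvStepA game x (0, 0, 1) (lo + 1) = (1, 1, 2) := by
          simp [pvStepA, hcell]
        rw [List.foldl_cons, step1, foldA_run game x _ 1 2 (by omega) (by omega)]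
        simp [pvRun, hcell]
      · have step1 : pvStepA game x (0, 0, 1) (lo + 1) = (0, 0, 2) := by
          simp [pvStepA, hcell]
        rw [List.foldl_cons, step1, foldA_broken game x _ 0 2 (by omega)]
        simp [pvRun, hcell]
    · rw [PySem.List.pyRange_one_eq_nil (le_of_not_gt h1)]
      simp [pvRun]
  · have e1 : PySem.List.pyRange lo hi 1 = [] := PySem.List.pyRange_one_eq_nil (by omega)
    have e2 : PySem.List.pyRange (lo + 1) hi 1 = [] := PySem.List.pyRange_one_eq_nil (by omega)
    rw [e1, e2]
    simp [pvRun]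

-- ===== VERDICT (by name: the statement is the Claim_ definition above) =====
theorem attackColRight_spec : Claim_equal_attackColRight := by
  intro game x y _ _
  unfold Spec_attackColRight
  by_cases hy : y < 0
  · simp only [attackColRight, attackColRight_alt, if_pos hy]
    rw [foldA_main]
    ring_nf
  · simp only [attackColRight, attackColRight_alt, if_neg hy]
    rw [foldA_main]
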